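-- pv_equiv track=rewrite | github.com/gluon/AbletonLive11_MIDIRemoteScripts | ableton/v2/control_surface/elements/display_data_source.py | adjust_string
-- ===== SOURCE A (Python) =====
-- def adjust_string(original, length):
--     u"""
--     Brings the string to the given length by either removing
--     characters or adding spaces. The algorithm is adopted from ede's
--     old implementation for the Mackie.
--     """
--     length = int(length)
--     assert length > 0
--     resulting_string = original
--     if len(resulting_string) > length:
--         unit_db = resulting_string.endswith(u'dB') and resulting_string.find(u'.') != -1
--         if len(resulting_string.strip()) > length and unit_db:
--             resulting_string = resulting_string[:-2]
--         if len(resulting_string) > length: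
--             for char in (u' ', u'_', u'i', u'o', u'u', u'e', u'a'):
--                 offset = 0 if char == u' ' else 1
--                 while len(resulting_string) > length and resulting_string.rfind(char, offset) > 0:
--                     char_pos = resulting_string.rfind(char, offset)
--                     resulting_string = resulting_string[:char_pos] + resulting_string[char_pos + 1:]
--
--             resulting_string = resulting_string[:length]
--     if len(resulting_string) < length:
--         resulting_string = resulting_string.ljust(length)
--     return resulting_string
-- ===== SOURCE B (Python) =====
-- def adjust_string(original, length):
--     """Same result as the original, but each priority class (' _iouea') is
--     handled in a single right-to-left pass instead of repeated rfind+rebuild."""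
--     length = int(length)
--     assert length > 0
--     s = original
--     if len(s) > length:
--         if len(s.strip()) > length and s.endswith('dB') and '.' in s:
--             s = s[:-2]
--         if len(s) > length:
--             head, tail = s[0], s[1:]
--             excess = len(s) - length
--             for ch in ' _iouea':
--                 if excess == 0:
--                     break
--                 k = excess
--                 buf = []
--                 for c in reversed(tail):
--                     if k and c == ch:
--                         k -= 1
--                     else:
--                         buf.append(c)
--                 excess = k
--                 tail = ''.join(reversed(buf))
--             s = (head + tail)[:length]
--     return s.ljust(length)
-- ===== Notes on version B (the rewrite author's own statement) =====
-- stated objective: faster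
-- what changed: Instead of repeatedly calling rfind and rebuilding the string for every removed character, B splits off the head once and, for each priority class, removes up to the remaining excess of that character's occurrences in a single right-to-left pass.
import Mathlib
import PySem

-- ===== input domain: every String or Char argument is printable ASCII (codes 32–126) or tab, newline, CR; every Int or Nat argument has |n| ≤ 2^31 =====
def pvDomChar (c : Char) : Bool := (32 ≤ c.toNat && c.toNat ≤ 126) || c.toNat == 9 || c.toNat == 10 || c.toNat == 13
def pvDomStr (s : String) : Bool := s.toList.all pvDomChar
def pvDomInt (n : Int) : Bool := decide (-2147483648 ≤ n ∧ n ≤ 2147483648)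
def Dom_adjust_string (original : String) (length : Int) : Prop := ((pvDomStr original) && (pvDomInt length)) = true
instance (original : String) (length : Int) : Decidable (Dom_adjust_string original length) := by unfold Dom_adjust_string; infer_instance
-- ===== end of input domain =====

-- B removes, for each priority class, all doomed characters in ONE right-to-left pass,
-- where A repeatedly calls rfind and rebuilds the string (objective: faster).

-- ===== PORT A =====
-- termination helpers for the while-loop (cited by name in decreasing_by)
theorem pv_go_cases (s : List Char) (c : Char) (j : Nat) :
    PySem.Chars.rfind.go s [c] j = -1 ∨
      (0 ≤ PySem.Chars.rfind.go s [c] j ∧ (PySem.Chars.rfind.go s [c] j).toNat < s.length) := by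
  induction j with
  | zero =>
    rw [PySem.Chars.rfind.go]
    by_cases h : List.isPrefixOf [c] s = true
    · right
      cases s with
      | nil => simp [List.isPrefixOf] at h
      | cons a t => simp [h]
    · left; simp [h]
  | succ j ih =>
    rw [PySem.Chars.rfind.go]
    by_cases h : List.isPrefixOf [c] (List.drop (j + 1) s) = true
    · right
      have hne : List.drop (j + 1) s ≠ [] := by
        intro he; rw [he] at h; simp [List.isPrefixOf] at h
      have := List.length_lt_of_drop_ne_nil hne
      simp [h]
      omega
    · simp [h]; exact ih

theorem pv_rfindFrom_lt (rs : List Char) (c : Char) (off : Int)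
    (h : 0 < PySem.Chars.rfindFrom rs [c] off) :
    PySem.Chars.rfindFrom rs [c] off < (rs.length : Int) := by
  unfold PySem.Chars.rfindFrom at h ⊢
  simp only at h ⊢
  set n : Int := (rs.length : Int) with hn
  set st : Int := if off < 0 then (if off + n < 0 then 0 else off + n) else off with hst
  have hst0 : 0 ≤ st := by rw [hst]; split_ifs <;> omega
  by_cases he : n < st
  · simp only [if_pos he] at h; omega
  · simp only [if_neg he] at h ⊢
    have hw : PySem.Chars.rfind (List.drop st.toNat (List.take n.toNat rs)) [c]
        = PySem.Chars.rfind.go (List.drop st.toNat (List.take n.toNat rs)) [c]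
            (List.drop st.toNat (List.take n.toNat rs)).length := rfl
    rw [hw] at h ⊢
    rcases pv_go_cases (List.drop st.toNat (List.take n.toNat rs)) c
        (List.drop st.toNat (List.take n.toNat rs)).length with hg | ⟨hg0, hglt⟩
    · rw [hg] at h; simp at h
    · have hlen : (List.drop st.toNat (List.take n.toNat rs)).length = rs.length - st.toNat := by
        simp [hn]
      split_ifs at h ⊢ with hr
      · omega
      · omega

theorem pv_remove_len_lt (rs : List Char) (p : Int) (h0 : 0 < p) (hlt : p < (rs.length : Int)) :
    (PySem.Chars.slice rs none (some p) ++ PySem.Chars.slice rs (some (p + 1)) none).length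
      < rs.length := by
  rw [PySem.Chars.slice_eq_listSlice, PySem.Chars.slice_eq_listSlice]
  rw [PySem.List.slice_to rs (by omega), PySem.List.slice_from rs (by omega)]
  simp
  omega

-- while len(resulting_string) > length and resulting_string.rfind(char, offset) > 0: remove at rfind
def adjustA_while (len_ : Int) (ch : Char) (offset : Int) (rs : List Char) : List Char :=
  if h : (rs.length : Int) > len_ ∧ PySem.Chars.rfindFrom rs [ch] offset > 0 then
    let char_pos := PySem.Chars.rfindFrom rs [ch] offset
    adjustA_while len_ ch offset
      (PySem.Chars.slice rs none (some char_pos) ++ PySem.Chars.slice rs (some (char_pos + 1)) none)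
  else rs
termination_by rs.length
decreasing_by
  exact pv_remove_len_lt rs _ h.2 (pv_rfindFrom_lt rs ch offset h.2)

-- for char in (' ', '_', 'i', 'o', 'u', 'e', 'a'): offset = 0 if char == ' ' else 1; while …
def adjustA_for : List Char → Int → List Char → List Char
  | [], _, rs => rs
  | ch :: rest, len_, rs =>
    let offset : Int := if ch = ' ' then 0 else 1
    adjustA_for rest len_ (adjustA_while len_ ch offset rs)

def adjust_string (original : String) (length : Int) : String :=
  -- assert length > 0 : raises AssertionError for length ≤ 0, excluded by Pre_
  let rs0 := original.toList
  let rs1 :=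
    if (rs0.length : Int) > length then
      let unit_db := PySem.Chars.endswith rs0 ['d', 'B'] && decide (PySem.Chars.find rs0 ['.'] ≠ -1)
      let rs' := if ((PySem.Chars.strip rs0).length : Int) > length ∧ unit_db = true
                 then PySem.Chars.slice rs0 none (some (-2)) else rs0
      if (rs'.length : Int) > length then
        PySem.Chars.slice (adjustA_for [' ', '_', 'i', 'o', 'u', 'e', 'a'] length rs') none (some length)
      else rs'
    else rs0
  -- .ljust(length): pad with spaces on the right (exact for 0 < length)
  let rs2 := if (rs1.length : Int) < length then rs1 ++ List.replicate (length.toNat - rs1.length) ' ' else rs1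
  String.ofList rs2

-- ===== PORT B =====
-- one right-to-left pass: skip up to `exc` occurrences of ch, keep the rest (buf + final reverse)
def adjustB_pass (exc : Nat) (ch : Char) (tl : List Char) : Nat × List Char :=
  let r := tl.reverse.foldl
    (fun st c => if st.1 ≠ 0 ∧ c = ch then (st.1 - 1, st.2) else (st.1, st.2 ++ [c]))
    (exc, ([] : List Char))
  (r.1, r.2.reverse)

-- for ch in ' _iouea': if excess == 0: break; one pass
def adjustB_for : List Char → Nat → List Char → List Char
  | [], _, tl => tl
  | ch :: rest, exc, tl =>
    if exc = 0 then tl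
    else
      let p := adjustB_pass exc ch tl
      adjustB_for rest p.1 p.2

def adjust_string_alt (original : String) (length : Int) : String :=
  let s := original.toList
  let s1 :=
    if (s.length : Int) > length then
      let s' := if ((PySem.Chars.strip s).length : Int) > length ∧
                   PySem.Chars.endswith s ['d', 'B'] = true ∧ PySem.Chars.isIn ['.'] s = true
                then PySem.Chars.slice s none (some (-2)) else s
      if (s'.length : Int) > length then
        match s' with
        | [] => s'   -- unreachable: s' is longer than length ≥ 1
        | h :: tl =>
          PySem.Chars.slice
            (h :: adjustB_for [' ', '_', 'i', 'o', 'u', 'e', 'a'] (s'.length - length.toNat) tl)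
            none (some length)
      else s'
    else s
  -- s.ljust(length)
  String.ofList (s1 ++ List.replicate (length.toNat - s1.length) ' ')

-- ===== PRECONDITION & SPEC =====
-- Pre_ excludes only length ≤ 0, where A's `assert length > 0` raises AssertionError.
def Pre_adjust_string (original : String) (length : Int) : Prop := 0 < length
instance (original : String) (length : Int) : Decidable (Pre_adjust_string original length) := by
  unfold Pre_adjust_string; infer_instance
def pvWitness_adjust_string : String × Int := ("a string", 5)

def Spec_adjust_string (original : String) (length : Int) (out : String) : Prop :=
  out = adjust_string_alt original length
instance (original : String) (length : Int) (out : String) : Decidable (Spec_adjust_string original length out) := by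
  unfold Spec_adjust_string; infer_instance

-- ===== CLAIM (what is proved, stated in full; the proofs are below) =====
def Claim_equal_adjust_string : Prop := ∀ (original : String) (length : Int),
  Dom_adjust_string original length → Pre_adjust_string original length →
    Spec_adjust_string original length (adjust_string original length)

-- ===== LEMMAS AND PROOFS =====

-- skipK c k l : l with its first k occurrences of c removed
def skipK (c : Char) : Nat → List Char → List Char
  | 0, l => l
  | _ + 1, [] => []
  | k + 1, x :: xs => if x = c then skipK c k xs else x :: skipK c (k + 1) xs

theorem skipK_nil (c : Char) (k : Nat) : skipK c k [] = [] := by cases k <;> rfl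

theorem skipK_zero (c : Char) (l : List Char) : skipK c 0 l = l := by
  cases l <;> simp [skipK]

theorem skipK_append_not_mem (c : Char) (k : Nat) (w l : List Char) (h : c ∉ w) :
    skipK c k (w ++ l) = w ++ skipK c k l := by
  induction w with
  | nil => rfl
  | cons x xs ih =>
    have hx : ¬ x = c := by intro he; exact h (by simp [he])
    cases k with
    | zero => simp [skipK]
    | succ k => simp [skipK, hx, ih (by intro hm; exact h (by simp [hm]))]

theorem skipK_not_mem (c : Char) (k : Nat) (l : List Char) (h : c ∉ l) :
    skipK c k l = l := by
  have := skipK_append_not_mem c k l [] h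
  simpa [skipK_nil] using this

theorem length_skipK (c : Char) (k : Nat) (l : List Char) :
    (skipK c k l).length = l.length - min k (l.count c) := by
  induction l generalizing k with
  | nil => simp [skipK_nil]
  | cons x xs ih =>
    cases k with
    | zero => simp [skipK]
    | succ k =>
      by_cases hx : x = c
      · have h1 : skipK c (k + 1) (x :: xs) = skipK c k xs := by simp [skipK, hx]
        have h2 : (x :: xs).count c = xs.count c + 1 := by simp [List.count_cons, hx]
        rw [h1, h2, ih k, List.length_cons]
        omega
      · have h1 : skipK c (k + 1) (x :: xs) = x :: skipK c (k + 1) xs := by simp [skipK, hx]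
        have h2 : (x :: xs).count c = xs.count c := by simp [List.count_cons, hx]
        rw [h1, h2, List.length_cons, List.length_cons, ih (k + 1)]
        have hcl : xs.count c ≤ xs.length := List.count_le_length
        omega

theorem pv_prefix_single (c : Char) (l : List Char) :
    (List.isPrefixOf [c] l = true) ↔ l[0]? = some c := by
  cases l with
  | nil => simp [List.isPrefixOf]
  | cons x xs =>
    simp [List.isPrefixOf]
    exact eq_comm

theorem pv_go_hit (s : List Char) (c : Char) (j : Nat) (h : s[j]? = some c) :
    PySem.Chars.rfind.go s [c] j = j := by
  have hp : List.isPrefixOf [c] (List.drop j s) = true := by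
    rw [pv_prefix_single]
    simpa using h
  cases j with
  | zero =>
    rw [List.drop_zero] at hp
    rw [PySem.Chars.rfind.go, if_pos hp]
    simp
  | succ j => rw [PySem.Chars.rfind.go, if_pos hp]

theorem pv_go_down (s : List Char) (c : Char) :
    ∀ j m : Nat, m ≤ j → (∀ i, m < i → i ≤ j → s[i]? ≠ some c) →
      PySem.Chars.rfind.go s [c] j = PySem.Chars.rfind.go s [c] m := by
  intro j
  induction j with
  | zero => intro m hm _; have hm0 : m = 0 := by omega
            rw [hm0]
  | succ j ih =>
    intro m hm hno
    rcases Nat.eq_or_lt_of_le hm with he | hlt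
    · rw [he]
    · have hij : s[j + 1]? ≠ some c := hno (j + 1) hlt (le_refl _)
      have hp : ¬ List.isPrefixOf [c] (List.drop (j + 1) s) = true := by
        rw [pv_prefix_single]; simpa using hij
      rw [PySem.Chars.rfind.go]
      simp only [hp, if_false]
      exact ih m (by omega) (fun i h1 h2 => hno i h1 (by omega))

theorem pv_go_zero_none (s : List Char) (c : Char) (h : s[0]? ≠ some c) :
    PySem.Chars.rfind.go s [c] 0 = -1 := by
  rw [PySem.Chars.rfind.go]
  have hp : ¬ List.isPrefixOf [c] s = true := by
    rw [pv_prefix_single]; simpa using h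
  simp [hp]

theorem pv_last_split (c : Char) (l : List Char) (h : c ∈ l) :
    ∃ u v, l = u ++ c :: v ∧ c ∉ v := by
  induction l with
  | nil => simp at h
  | cons x xs ih =>
    by_cases hm : c ∈ xs
    · obtain ⟨u, v, he, hv⟩ := ih hm
      exact ⟨x :: u, v, by simp [he], hv⟩
    · have hx : x = c := by
        rcases List.mem_cons.mp h with h1 | h1
        · exact h1.symm
        · exact absurd h1 hm
      exact ⟨[], xs, by simp [hx], hm⟩

theorem pv_not_mem_getElem? (s : List Char) (c : Char) (h : c ∉ s) (i : Nat) :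
    s[i]? ≠ some c := by
  intro he
  exact h (List.mem_of_getElem? he)

theorem pv_rfind_last (u v : List Char) (c : Char) (h : c ∉ v) :
    PySem.Chars.rfind (u ++ c :: v) [c] = (u.length : Int) := by
  have hrw : PySem.Chars.rfind (u ++ c :: v) [c]
      = PySem.Chars.rfind.go (u ++ c :: v) [c] (u ++ c :: v).length := rfl
  rw [hrw]
  have hhit : (u ++ c :: v)[u.length]? = some c := by
    rw [List.getElem?_append_right (le_refl _)]
    simp
  have hno : ∀ i, u.length < i → i ≤ (u ++ c :: v).length → (u ++ c :: v)[i]? ≠ some c := by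
    intro i hlt hle
    by_cases hge : i < (u ++ c :: v).length
    · rw [List.getElem?_append_right (by omega)]
      have hj : i - u.length = (i - u.length - 1) + 1 := by omega
      rw [hj, List.getElem?_cons_succ]
      exact pv_not_mem_getElem? v c h _
    · rw [List.getElem?_eq_none (by omega)]
      simp
  rw [pv_go_down (u ++ c :: v) c (u ++ c :: v).length u.length (by simp) hno]
  exact pv_go_hit _ c u.length hhit

theorem pv_rfind_none (s : List Char) (c : Char) (h : c ∉ s) :
    PySem.Chars.rfind s [c] = -1 := by
  have hrw : PySem.Chars.rfind s [c] = PySem.Chars.rfind.go s [c] s.length := rfl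
  rw [hrw]
  rw [pv_go_down s c s.length 0 (by omega) (fun i _ _ => pv_not_mem_getElem? s c h i)]
  exact pv_go_zero_none s c (pv_not_mem_getElem? s c h 0)

theorem pv_rfindFrom_eval (s : List Char) (c : Char) (off : Int) (h0 : 0 ≤ off)
    (hle : off ≤ (s.length : Int)) :
    PySem.Chars.rfindFrom s [c] off =
      (if PySem.Chars.rfind (List.drop off.toNat s) [c] = -1 then -1
       else off + PySem.Chars.rfind (List.drop off.toNat s) [c]) := by
  unfold PySem.Chars.rfindFrom
  simp only
  have h1 : ¬ ((s.length : Int) < off) := by omega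
  have h2 : ¬ (off < 0) := by omega
  rw [if_neg h2, if_neg h1]
  have h3 : (s.length : Int).toNat = s.length := by omega
  rw [h3, List.take_length]

theorem pv_rfindFrom_cons_not_mem (hd c : Char) (tl : List Char) (off : Int)
    (hoff : off = 0 ∨ off = 1) (h : c ∉ tl) :
    PySem.Chars.rfindFrom (hd :: tl) [c] off ≤ 0 := by
  have h0 : 0 ≤ off := by rcases hoff with h | h <;> omega
  have hle : off ≤ ((hd :: tl).length : Int) := by
    rcases hoff with h | h <;> simp [h] <;> omega
  rw [pv_rfindFrom_eval (hd :: tl) c off h0 hle]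
  rcases hoff with ho | ho <;> subst ho
  · simp only [Int.toNat_zero, List.drop_zero]
    by_cases hc : c = hd
    · subst hc
      rw [show (c :: tl) = [] ++ c :: tl from rfl, pv_rfind_last [] tl c h]
      simp
    · rw [pv_rfind_none (hd :: tl) c (by simp [hc, h])]
      simp
  · have : Int.toNat 1 = 1 := rfl
    rw [this, List.drop_one, List.tail_cons, pv_rfind_none tl c h]
    simp

theorem pv_rfindFrom_cons_mem (hd c : Char) (u v : List Char) (off : Int)
    (hoff : off = 0 ∨ off = 1) (hv : c ∉ v) :
    PySem.Chars.rfindFrom (hd :: (u ++ c :: v)) [c] off = 1 + (u.length : Int) := by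
  have h0 : 0 ≤ off := by rcases hoff with h | h <;> omega
  have hle : off ≤ ((hd :: (u ++ c :: v)).length : Int) := by
    rcases hoff with h | h <;> simp [h] <;> omega
  rw [pv_rfindFrom_eval _ c off h0 hle]
  rcases hoff with ho | ho <;> subst ho
  · simp only [Int.toNat_zero, List.drop_zero]
    rw [show (hd :: (u ++ c :: v)) = (hd :: u) ++ c :: v from rfl, pv_rfind_last (hd :: u) v c hv]
    rw [if_neg (by simp; omega)]
    simp
    omega
  · have h1 : Int.toNat 1 = 1 := rfl
    rw [h1, List.drop_one, List.tail_cons, pv_rfind_last u v c hv]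
    rw [if_neg (by omega)]

theorem pv_while_eval (len_ : Int) (hlen : 1 ≤ len_) (c : Char) (off : Int)
    (hoff : off = 0 ∨ off = 1) :
    ∀ (n : Nat) (tl : List Char), tl.length ≤ n → ∀ (hd : Char),
      adjustA_while len_ c off (hd :: tl)
        = hd :: (skipK c ((1 + tl.length) - len_.toNat) tl.reverse).reverse := by
  intro n
  induction n with
  | zero =>
    intro tl hlen0 hd
    have htl : tl = [] := by simpa using hlen0
    subst htl
    rw [adjustA_while]
    rw [dif_neg (by simp; omega)]
    have he : (1 + ([] : List Char).length) - len_.toNat = 0 := by simp; omega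
    rw [he]
    rfl
  | succ n ih =>
    intro tl hlen1 hd
    rw [adjustA_while]
    by_cases hgt : (((hd :: tl).length : Int) > len_)
    · by_cases hmem : c ∈ tl
      · obtain ⟨u, v, huv, hv⟩ := pv_last_split c tl hmem
        subst huv
        have hf := pv_rfindFrom_cons_mem hd c u v off hoff hv
        rw [dif_pos ⟨hgt, by rw [hf]; omega⟩]
        simp only [hf]
        have hsl1 : PySem.Chars.slice (hd :: (u ++ c :: v)) none (some (1 + (u.length : Int)))
            = hd :: u := by
          rw [PySem.Chars.slice_eq_listSlice,
            show (1 + (u.length : Int)) = (((hd :: u).length : Nat) : Int) by simp; omega,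
            PySem.List.slice_to_natCast,
            show (hd :: (u ++ c :: v)) = (hd :: u) ++ c :: v from rfl,
            List.take_left]
        have hsl2 : PySem.Chars.slice (hd :: (u ++ c :: v)) (some (1 + (u.length : Int) + 1)) none
            = v := by
          rw [PySem.Chars.slice_eq_listSlice,
            show (1 + (u.length : Int) + 1) = (((u.length + 2 : Nat) : Nat) : Int) by simp; omega,
            PySem.List.slice_from_natCast]
          rw [show (hd :: (u ++ c :: v)) = (hd :: u ++ [c]) ++ v by simp,
            show u.length + 2 = (hd :: u ++ [c]).length by simp,
            List.drop_left]
        rw [hsl1, hsl2, List.cons_append]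
        have hlen2 : (u ++ v).length ≤ n := by simp at hlen1 ⊢; omega
        rw [ih (u ++ v) hlen2 hd]
        have hexc : ∃ e, (1 + (u ++ c :: v).length) - len_.toNat = e + 1
            ∧ (1 + (u ++ v).length) - len_.toNat = e := by
          refine ⟨(1 + (u ++ v).length) - len_.toNat, ?_, rfl⟩
          simp at hgt ⊢
          omega
        obtain ⟨e, he1, he2⟩ := hexc
        rw [he1, he2]
        have hrev1 : (u ++ c :: v).reverse = v.reverse ++ c :: u.reverse := by simp
        have hrev2 : (u ++ v).reverse = v.reverse ++ u.reverse := by simp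
        rw [hrev1, hrev2,
          skipK_append_not_mem c (e + 1) v.reverse _ (by simpa using hv),
          skipK_append_not_mem c e v.reverse _ (by simpa using hv),
          show skipK c (e + 1) (c :: u.reverse) = skipK c e u.reverse by simp [skipK]]
      · rw [dif_neg (by
          intro hand
          have := pv_rfindFrom_cons_not_mem hd c tl off hoff hmem
          omega)]
        rw [skipK_not_mem c _ tl.reverse (by simpa using hmem), List.reverse_reverse]
    · rw [dif_neg (by intro hand; exact hgt hand.1)]
      have he : (1 + tl.length) - len_.toNat = 0 := by simp at hgt; omega
      rw [he]
      rw [skipK_zero, List.reverse_reverse]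

theorem pv_foldB (c : Char) : ∀ (r : List Char) (k : Nat) (acc : List Char),
    r.foldl (fun st x => if st.1 ≠ 0 ∧ x = c then (st.1 - 1, st.2) else (st.1, st.2 ++ [x]))
        (k, acc)
      = (k - min k (r.count c), acc ++ skipK c k r) := by
  intro r
  induction r with
  | nil => intro k acc; simp [skipK_nil]
  | cons x r ih =>
    intro k acc
    rw [List.foldl_cons]
    cases k with
    | zero =>
      rw [if_neg (by simp)]
      rw [ih 0 (acc ++ [x])]
      simp [skipK_zero]
    | succ e =>
      by_cases hx : x = c
      · rw [if_pos ⟨by omega, hx⟩]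
        simp only [Nat.add_sub_cancel]
        rw [ih e acc]
        subst hx
        have hsk : skipK x (e + 1) (x :: r) = skipK x e r := by simp [skipK]
        have hcnt : (x :: r).count x = r.count x + 1 := by simp
        rw [hsk, hcnt]
        have : e + 1 - min (e + 1) (r.count x + 1) = e - min e (r.count x) := by omega
        rw [this]
      · rw [if_neg (by
          intro hand
          exact hx hand.2)]
        rw [ih (e + 1) (acc ++ [x])]
        have hsk : skipK c (e + 1) (x :: r) = x :: skipK c (e + 1) r := by simp [skipK, hx]
        have hcnt : (x :: r).count c = r.count c := by simp [List.count_cons, hx]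
        rw [hsk, hcnt, List.append_assoc]
        rfl

theorem pv_pass_eval (exc : Nat) (c : Char) (tl : List Char) :
    adjustB_pass exc c tl = (exc - min exc (tl.count c), (skipK c exc tl.reverse).reverse) := by
  unfold adjustB_pass
  rw [pv_foldB c tl.reverse exc []]
  simp [List.count_reverse]

theorem adjustB_for_zero : ∀ (cs : List Char) (tl : List Char), adjustB_for cs 0 tl = tl := by
  intro cs tl
  cases cs <;> simp [adjustB_for]

theorem pv_chain (len_ : Int) (hlen : 1 ≤ len_) :
    ∀ (cs : List Char) (hd : Char) (tl : List Char),
      adjustA_for cs len_ (hd :: tl)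
        = hd :: adjustB_for cs ((1 + tl.length) - len_.toNat) tl := by
  intro cs
  induction cs with
  | nil => intro hd tl; simp [adjustA_for, adjustB_for]
  | cons ch rest ih =>
    intro hd tl
    rw [adjustA_for]
    have hoff : (if ch = ' ' then (0 : Int) else 1) = 0 ∨ (if ch = ' ' then (0 : Int) else 1) = 1 := by
      by_cases h : ch = ' ' <;> simp [h]
    rw [pv_while_eval len_ hlen ch _ hoff tl.length tl le_rfl hd]
    rw [adjustB_for]
    by_cases hz : (1 + tl.length) - len_.toNat = 0
    · rw [hz]
      rw [skipK_zero, List.reverse_reverse, if_pos rfl]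
      rw [ih hd tl, hz, adjustB_for_zero]
    · rw [if_neg hz]
      rw [ih hd ((skipK ch ((1 + tl.length) - len_.toNat) tl.reverse).reverse)]
      rw [pv_pass_eval]
      simp only [List.length_reverse, length_skipK, List.count_reverse]
      have hcl : tl.count ch ≤ tl.length := List.count_le_length
      have harith : (1 + (tl.reverse.length - min ((1 + tl.length) - len_.toNat) (tl.count ch)))
          - len_.toNat
          = (1 + tl.length) - len_.toNat - min ((1 + tl.length) - len_.toNat) (tl.count ch) := by
        simp [List.length_reverse]
        omega
      rw [List.length_reverse] at harith
      rw [harith]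

theorem pv_ljust (len_ : Int) (t : List Char) :
    (if (t.length : Int) < len_ then t ++ List.replicate (len_.toNat - t.length) ' ' else t)
      = t ++ List.replicate (len_.toNat - t.length) ' ' := by
  by_cases h : (t.length : Int) < len_
  · simp [h]
  · have : len_.toNat - t.length = 0 := by omega
    simp [h, this]

-- ===== VERDICT (by name: the statement is the Claim_ definition above) =====
theorem adjust_string_spec : Claim_equal_adjust_string := by
  intro original length hdom hpre
  unfold Pre_adjust_string at hpre
  unfold Spec_adjust_string adjust_string adjust_string_alt
  simp only
  set s := original.toList with hs
  by_cases h1 : (s.length : Int) > length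
  · rw [if_pos h1, if_pos h1]
    have hdb : (PySem.Chars.endswith s ['d','B'] && decide (PySem.Chars.find s ['.'] ≠ -1)) = true
        ↔ (PySem.Chars.endswith s ['d','B'] = true ∧ PySem.Chars.isIn ['.'] s = true) := by
      rw [Bool.and_eq_true, decide_eq_true_iff, PySem.Chars.find_ne_neg_one_iff,
        PySem.Chars.isIn_iff_infix]
    have hcond : (if ((PySem.Chars.strip s).length : Int) > length ∧
          (PySem.Chars.endswith s ['d','B'] && decide (PySem.Chars.find s ['.'] ≠ -1)) = true
        then PySem.Chars.slice s none (some (-2)) else s)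
        = (if ((PySem.Chars.strip s).length : Int) > length ∧
            (PySem.Chars.endswith s ['d','B'] = true ∧ PySem.Chars.isIn ['.'] s = true)
          then PySem.Chars.slice s none (some (-2)) else s) :=
      if_congr (and_congr_right fun _ => hdb) rfl rfl
    rw [hcond]
    set s' := (if ((PySem.Chars.strip s).length : Int) > length ∧
            (PySem.Chars.endswith s ['d','B'] = true ∧ PySem.Chars.isIn ['.'] s = true)
          then PySem.Chars.slice s none (some (-2)) else s) with hs'
    by_cases h2 : (s'.length : Int) > length
    · rw [if_pos h2, if_pos h2]
      have hne : s' ≠ [] := by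
        intro he
        rw [he] at h2
        simp at h2
        omega
      obtain ⟨hd, tl, he⟩ := List.exists_cons_of_ne_nil hne
      rw [he]
      have hlen1 : (1 : Int) ≤ length := by omega
      rw [pv_chain length hlen1 [' ', '_', 'i', 'o', 'u', 'e', 'a'] hd tl]
      have hexc : (hd :: tl).length - length.toNat = (1 + tl.length) - length.toNat := by
        simp [Nat.add_comm]
      rw [hexc, pv_ljust]
    · rw [if_neg h2, if_neg h2, pv_ljust]
  · rw [if_neg h1, if_neg h1, pv_ljust]
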